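-- pv_equiv track=rewrite | github.com/FaultMaven/FaultMaven-Mono | faultmaven/services/enhanced_knowledge_service.py | _get_content_cluster_key
-- ===== SOURCE A (Python) =====
-- def _get_content_cluster_key(query: str) -> str:
--     """Get content cluster key for query"""
--     # Classify query into semantic clusters
--     query_words = set(query.lower().split())
--
--     cluster_keywords = {
--         "error_cluster": {"error", "failed", "problem", "issue", "bug"},
--         "config_cluster": {"config", "setup", "install", "configure", "setting"},
--         "performance_cluster": {"slow", "performance", "memory", "cpu", "optimization"},
--         "network_cluster": {"network", "connection", "timeout", "dns", "firewall"},
--         "database_cluster": {"database", "sql", "query", "table", "index"}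
--     }
--
--     best_cluster = "general"
--     best_overlap = 0
--
--     for cluster, keywords in cluster_keywords.items():
--         overlap = len(query_words.intersection(keywords))
--         if overlap > best_overlap:
--             best_overlap = overlap
--             best_cluster = cluster
--
--     return best_cluster if best_overlap > 0 else "general"
-- ===== SOURCE B (Python) =====
-- _CLUSTER_KEYWORDS = [
--     ("error_cluster", ("error", "failed", "problem", "issue", "bug")),
--     ("config_cluster", ("config", "setup", "install", "configure", "setting")),
--     ("performance_cluster", ("slow", "performance", "memory", "cpu", "optimization")),
--     ("network_cluster", ("network", "connection", "timeout", "dns", "firewall")),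
--     ("database_cluster", ("database", "sql", "query", "table", "index")),
-- ]
--
-- # reverse index: keyword -> cluster (keywords are pairwise distinct across clusters)
-- _KEYWORD_INDEX = {w: c for c, ws in _CLUSTER_KEYWORDS for w in ws}
--
--
-- def _get_content_cluster_key(query: str) -> str:
--     counts = {}
--     for word in set(query.lower().split()):
--         cluster = _KEYWORD_INDEX.get(word)
--         if cluster is not None:
--             counts[cluster] = counts.get(cluster, 0) + 1
--     best_cluster, best = "general", 0
--     for cluster, _ in _CLUSTER_KEYWORDS:
--         n = counts.get(cluster, 0)
--         if n > best:
--             best_cluster, best = cluster, n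
--     return best_cluster
-- ===== Notes on version B (the rewrite author's own statement) =====
-- stated objective: idiomatic
-- what changed: Replaced per-cluster set intersections with a precomputed keyword-to-cluster reverse index: one pass over the query's distinct words accumulates per-cluster counts, then the winner is picked in cluster order by strictly greater count.
import Mathlib
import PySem

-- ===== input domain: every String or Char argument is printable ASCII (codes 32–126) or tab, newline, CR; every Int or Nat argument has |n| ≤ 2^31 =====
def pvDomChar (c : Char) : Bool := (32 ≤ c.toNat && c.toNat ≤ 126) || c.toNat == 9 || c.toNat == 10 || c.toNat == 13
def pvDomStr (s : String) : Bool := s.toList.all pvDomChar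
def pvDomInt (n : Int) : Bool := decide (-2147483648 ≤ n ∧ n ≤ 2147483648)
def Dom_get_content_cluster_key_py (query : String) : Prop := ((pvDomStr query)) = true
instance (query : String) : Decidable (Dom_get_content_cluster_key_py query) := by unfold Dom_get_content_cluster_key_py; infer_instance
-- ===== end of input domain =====

-- B replaces A's per-cluster set intersections by a keyword→cluster reverse index and a
-- per-cluster counter filled in one pass over the query's distinct words (idiomatic, same cost).

-- ===== PORT A =====
-- the dict literal of A, as (cluster, keyword-set) pairs in insertion order
def pvClustersA : List (String × PySem.Set String) :=
  [("error_cluster", ["error", "failed", "problem", "issue", "bug"]),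
   ("config_cluster", ["config", "setup", "install", "configure", "setting"]),
   ("performance_cluster", ["slow", "performance", "memory", "cpu", "optimization"]),
   ("network_cluster", ["network", "connection", "timeout", "dns", "firewall"]),
   ("database_cluster", ["database", "sql", "query", "table", "index"])]

def get_content_cluster_key_py (query : String) : String :=
  let query_words : PySem.Set String :=
    PySem.Set.ofList (PySem.Str.split₀ (PySem.Str.lower query))
  let r : String × Int := pvClustersA.foldl
    (fun (st : String × Int) ck =>
      let overlap : Int := ((PySem.Set.inter query_words ck.2).length : Int)
      if overlap > st.2 then (ck.1, overlap) else st)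
    ("general", 0)
  if r.2 > 0 then r.1 else "general"

-- ===== PORT B =====
-- the reverse index of Source B: keyword -> cluster (the dict comprehension, written out)
def pvPairsB : List (String × String) :=
  [("error", "error_cluster"), ("failed", "error_cluster"), ("problem", "error_cluster"),
   ("issue", "error_cluster"), ("bug", "error_cluster"),
   ("config", "config_cluster"), ("setup", "config_cluster"), ("install", "config_cluster"),
   ("configure", "config_cluster"), ("setting", "config_cluster"),
   ("slow", "performance_cluster"), ("performance", "performance_cluster"),
   ("memory", "performance_cluster"), ("cpu", "performance_cluster"),
   ("optimization", "performance_cluster"),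
   ("network", "network_cluster"), ("connection", "network_cluster"),
   ("timeout", "network_cluster"), ("dns", "network_cluster"), ("firewall", "network_cluster"),
   ("database", "database_cluster"), ("sql", "database_cluster"), ("query", "database_cluster"),
   ("table", "database_cluster"), ("index", "database_cluster")]

def pvIndexB : PySem.Dict String String := PySem.Dict.ofList pvPairsB

def pvOrderB : List String :=
  ["error_cluster", "config_cluster", "performance_cluster", "network_cluster", "database_cluster"]

-- the body of Source B's counting loop: counts[cluster] = counts.get(cluster, 0) + 1 when indexed
def pvBumpB (d : PySem.Dict String Int) (w : String) : PySem.Dict String Int :=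
  match pvIndexB.get? w with
  | some c => d.insert c (d.getD c 0 + 1)
  | none => d

def get_content_cluster_key_py_alt (query : String) : String :=
  let words : PySem.Set String :=
    PySem.Set.ofList (PySem.Str.split₀ (PySem.Str.lower query))
  -- iterating the Set only fills a Dict looked up afterwards: order-independent
  let counts : PySem.Dict String Int := words.foldl pvBumpB PySem.Dict.empty
  let r : String × Int := pvOrderB.foldl
    (fun (st : String × Int) c =>
      let n := counts.getD c 0
      if n > st.2 then (c, n) else st)
    ("general", 0)
  r.1

-- ===== PRECONDITION & SPEC =====
def Spec_get_content_cluster_key_py (query : String) (out : String) : Prop := out = get_content_cluster_key_py_alt query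
instance (query : String) (out : String) : Decidable (Spec_get_content_cluster_key_py query out) := by unfold Spec_get_content_cluster_key_py; infer_instance

-- ===== CLAIM (what is proved, stated in full; the proofs are below) =====
def Claim_equal_get_content_cluster_key_py : Prop := ∀ (query : String), Dom_get_content_cluster_key_py query → Spec_get_content_cluster_key_py query (get_content_cluster_key_py query)

-- ===== LEMMAS AND PROOFS =====

theorem pvIndexB_eq_mk : pvIndexB = PySem.Dict.mk pvPairsB := by decide

-- get? of a key-nodup assoc dict, as membership of the pair
theorem pv_get?_mk_eq_some (ps : List (String × String)) (hnd : (ps.map Prod.fst).Nodup)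
    (w c : String) :
    ((PySem.Dict.mk ps).get? w == some c) = ps.contains (w, c) := by
  induction ps with
  | nil => rfl
  | cons p rest ih =>
    obtain ⟨k, v⟩ := p
    simp only [List.map_cons, List.nodup_cons] at hnd
    rw [PySem.Dict.get?_mk_cons]
    by_cases hkw : k = w
    · subst hkw
      have hmem : (k, c) ∉ rest := fun hm => hnd.1 (List.mem_map_of_mem hm)
      simp [hmem]
      by_cases hvc : v = c
      · simp [hvc]
      · simp [hvc, Ne.symm hvc]
    · simp [ih hnd.2, hkw, Ne.symm hkw]

-- B's counter after the fold: counts.getD c 0 counts the words the index maps to c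
theorem pv_counts_getD (L : List String) (d : PySem.Dict String Int) (c : String) :
    (L.foldl pvBumpB d).getD c 0
      = d.getD c 0 + (L.countP (fun w => pvIndexB.get? w == some c) : Int) := by
  induction L generalizing d with
  | nil => simp
  | cons w t ih =>
    simp only [List.foldl_cons, List.countP_cons, pvBumpB]
    rcases h : pvIndexB.get? w with _ | c'
    · simp [ih]
    · rw [ih]
      by_cases hc : c = c'
      · subst hc; simp; ring
      · simp [PySem.Dict.getD_insert, hc, Ne.symm hc]

-- per cluster: B's count equals A's intersection size
theorem pv_count_eq_inter (S : PySem.Set String) (c : String) (K : PySem.Set String)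
    (h : (c, K) ∈ pvClustersA) :
    (S.countP (fun w => pvIndexB.get? w == some c) : Int)
      = ((PySem.Set.inter S K).length : Int) := by
  have hq : ∀ w, (pvIndexB.get? w == some c) = K.contains w := by
    intro w
    rw [pvIndexB_eq_mk, pv_get?_mk_eq_some pvPairsB (by decide)]
    fin_cases h <;> simp [pvPairsB]
  have : S.countP (fun w => pvIndexB.get? w == some c) = (PySem.Set.inter S K).length := by
    simp only [PySem.Set.inter, List.countP_eq_length_filter]
    exact congrArg List.length (List.filter_congr (fun w _ => hq w))
  exact_mod_cast this

set_option maxHeartbeats 1000000 in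
-- ===== VERDICT (by name: the statement is the Claim_ definition above) =====
theorem get_content_cluster_key_py_spec : Claim_equal_get_content_cluster_key_py := by
  intro query _
  unfold Spec_get_content_cluster_key_py
  simp only [get_content_cluster_key_py, get_content_cluster_key_py_alt]
  generalize PySem.Set.ofList (PySem.Str.split₀ (PySem.Str.lower query)) = S
  have hc : ∀ c K, (c, K) ∈ pvClustersA →
      (S.foldl pvBumpB PySem.Dict.empty).getD c 0 = ((PySem.Set.inter S K).length : Int) := by
    intro c K h
    rw [pv_counts_getD, pv_count_eq_inter S c K h]
    simp
  have h1 := hc "error_cluster" ["error", "failed", "problem", "issue", "bug"] (by decide)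
  have h2 := hc "config_cluster" ["config", "setup", "install", "configure", "setting"] (by decide)
  have h3 := hc "performance_cluster" ["slow", "performance", "memory", "cpu", "optimization"] (by decide)
  have h4 := hc "network_cluster" ["network", "connection", "timeout", "dns", "firewall"] (by decide)
  have h5 := hc "database_cluster" ["database", "sql", "query", "table", "index"] (by decide)
  simp only [pvClustersA, pvOrderB, List.foldl_cons, List.foldl_nil]
  rw [h1, h2, h3, h4, h5]
  have n1 := Int.natCast_nonneg (PySem.Set.inter S ["error", "failed", "problem", "issue", "bug"]).length
  have n2 := Int.natCast_nonneg (PySem.Set.inter S ["config", "setup", "install", "configure", "setting"]).length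
  have n3 := Int.natCast_nonneg (PySem.Set.inter S ["slow", "performance", "memory", "cpu", "optimization"]).length
  have n4 := Int.natCast_nonneg (PySem.Set.inter S ["network", "connection", "timeout", "dns", "firewall"]).length
  have n5 := Int.natCast_nonneg (PySem.Set.inter S ["database", "sql", "query", "table", "index"]).length
  split_ifs <;> first | rfl | omega
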